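-- pv_equiv track=rewrite | github.com/wlinsk-gcy/StewardFlow | sandbox/api/app.py | _normalize_permission_list
-- ===== SOURCE A (Python) =====
-- DEFAULT_AUTO_GRANT_PERMISSIONS = [
--     "geolocation",
--     "notifications",
--     "camera",
--     "microphone",
--     "clipboard-read",
--     "clipboard-write",
-- ]
--
-- SUPPORTED_BROWSER_PERMISSIONS = {
--     "geolocation",
--     "midi",
--     "midi-sysex",
--     "notifications",
--     "camera",
--     "microphone",
--     "background-sync",
--     "ambient-light-sensor",
--     "accelerometer",
--     "gyroscope",
--     "magnetometer",
--     "accessibility-events",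
--     "clipboard-read",
--     "clipboard-write",
--     "payment-handler",
--     "persistent-storage",
--     "idle-detection",
-- }
--
-- def _normalize_permission_list(raw: str | None) -> list[str]:
--     source = raw if raw is not None else ",".join(DEFAULT_AUTO_GRANT_PERMISSIONS)
--     normalized: list[str] = []
--     seen: set[str] = set()
--     for item in str(source).split(","):
--         value = item.strip().lower()
--         if not value or value in seen:
--             continue
--         if value not in SUPPORTED_BROWSER_PERMISSIONS:
--             continue
--         seen.add(value)
--         normalized.append(value)
--     if normalized:
--         return normalized
--     return list(DEFAULT_AUTO_GRANT_PERMISSIONS)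
-- ===== SOURCE B (Python) =====
-- DEFAULT_AUTO_GRANT_PERMISSIONS = [
--     "geolocation",
--     "notifications",
--     "camera",
--     "microphone",
--     "clipboard-read",
--     "clipboard-write",
-- ]
--
-- SUPPORTED_BROWSER_PERMISSIONS = {
--     "geolocation",
--     "midi",
--     "midi-sysex",
--     "notifications",
--     "camera",
--     "microphone",
--     "background-sync",
--     "ambient-light-sensor",
--     "accelerometer",
--     "gyroscope",
--     "magnetometer",
--     "accessibility-events",
--     "clipboard-read",
--     "clipboard-write",
--     "payment-handler",
--     "persistent-storage",
--     "idle-detection",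
-- }
--
--
-- def _dedup_first(tokens):
--     # Recursive dedup: keep the head, delete every later copy of it, recurse.
--     if not tokens:
--         return []
--     head = tokens[0]
--     return [head] + _dedup_first([t for t in tokens[1:] if t != head])
--
--
-- def _normalize_permission_list(raw):
--     source = raw if raw is not None else ",".join(DEFAULT_AUTO_GRANT_PERMISSIONS)
--     # "" is never a supported permission, so membership alone filters empties too.
--     tokens = [item.strip().lower() for item in str(source).split(",")]
--     normalized = _dedup_first([v for v in tokens if v in SUPPORTED_BROWSER_PERMISSIONS])
--     return normalized if normalized else list(DEFAULT_AUTO_GRANT_PERMISSIONS)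
-- ===== Notes on version B (the rewrite author's own statement) =====
-- stated objective: alternative
-- what changed: Replaces the single forward pass with a seen-set by staged passes (map, then filter by the support set with no emptiness test) plus a recursive dedup that keeps each head and deletes its later copies from the tail, maintaining no auxiliary seen state.
import Mathlib
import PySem

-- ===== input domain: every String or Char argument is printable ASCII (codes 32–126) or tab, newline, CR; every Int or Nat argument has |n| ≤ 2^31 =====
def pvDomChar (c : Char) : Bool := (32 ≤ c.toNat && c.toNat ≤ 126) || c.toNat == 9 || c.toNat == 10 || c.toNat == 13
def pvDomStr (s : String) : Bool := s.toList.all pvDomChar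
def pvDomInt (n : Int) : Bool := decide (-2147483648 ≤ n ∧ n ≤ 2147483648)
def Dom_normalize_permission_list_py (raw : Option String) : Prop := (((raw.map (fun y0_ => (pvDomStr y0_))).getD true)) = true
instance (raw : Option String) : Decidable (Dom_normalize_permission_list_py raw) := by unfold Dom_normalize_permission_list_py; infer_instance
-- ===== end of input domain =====

-- B replaces A's single forward pass with a seen-set by staged map/filter passes plus
-- a recursive dedup that keeps each head and deletes its later copies (alternative; same result).


-- ===== PORT A =====
-- A walks the comma-split tokens once, maintaining a `seen` set and an output list,
-- skipping empties, duplicates and unsupported names with `continue`-style branches.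
def pvDefaults : List String :=
  ["geolocation", "notifications", "camera", "microphone", "clipboard-read", "clipboard-write"]

def pvSupported : PySem.Set String :=
  PySem.Set.ofList ["geolocation", "midi", "midi-sysex", "notifications", "camera",
    "microphone", "background-sync", "ambient-light-sensor", "accelerometer", "gyroscope",
    "magnetometer", "accessibility-events", "clipboard-read", "clipboard-write",
    "payment-handler", "persistent-storage", "idle-detection"]

-- str.split(",") with the nonempty literal separator: split? is always `some`, getD [] is never taken.
def pvSplitComma (s : String) : List String := (PySem.Str.split? s ",").getD []

def normalize_permission_list_py (raw : Option String) : List String :=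
  let source := match raw with
    | some s => s
    | none => PySem.Str.join "," pvDefaults
  let st := (pvSplitComma source).foldl
    (fun (st : List String × PySem.Set String) item =>
      let value := PySem.Str.lower (PySem.Str.strip item)
      if value = "" ∨ value ∈ st.2 then st
      else if value ∉ pvSupported then st
      else (st.1 ++ [value], PySem.Set.add st.2 value))
    ([], PySem.Set.empty)
  if st.1 ≠ [] then st.1 else pvDefaults

-- ===== PORT B =====
-- B's recursive dedup: keep the head, delete every later copy of it, recurse on the rest.
def pvDedupFirst : List String → List String
  | [] => []
  | h :: t => h :: pvDedupFirst (t.filter (fun x => x ≠ h))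
termination_by xs => xs.length
decreasing_by
  simp only [List.length_unattach, List.length_cons]
  exact Nat.lt_succ_of_le (le_trans (List.length_filter_le _ _) (by simp))

def normalize_permission_list_py_alt (raw : Option String) : List String :=
  let source := match raw with
    | some s => s
    | none => PySem.Str.join "," pvDefaults
  -- "" is never a supported permission, so membership alone filters empties too.
  let tokens := (pvSplitComma source).map (fun item => PySem.Str.lower (PySem.Str.strip item))
  let normalized := pvDedupFirst (tokens.filter (fun v => v ∈ pvSupported))
  if normalized ≠ [] then normalized else pvDefaults

-- ===== PRECONDITION & SPEC =====
def Spec_normalize_permission_list_py (raw : Option String) (out : List String) : Prop := out = normalize_permission_list_py_alt raw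
instance (raw : Option String) (out : List String) : Decidable (Spec_normalize_permission_list_py raw out) := by unfold Spec_normalize_permission_list_py; infer_instance

-- ===== CLAIM (what is proved, stated in full; the proofs are below) =====
def Claim_equal_normalize_permission_list_py : Prop := ∀ (raw : Option String), Dom_normalize_permission_list_py raw → Spec_normalize_permission_list_py raw (normalize_permission_list_py raw)

-- ===== LEMMAS AND PROOFS =====

-- A's loop over any token list, started on a duplicate-free diagonal state (seen = output),
-- produces exactly the Set.add-fold of the filtered mapped tokens (first occurrences kept).
theorem pv_loop (f : String → String) (S : PySem.Set String) (ts : List String)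
    (acc : List String) (hnd : acc.Nodup) :
    (ts.foldl
      (fun (st : List String × PySem.Set String) item =>
        let value := f item
        if value = "" ∨ value ∈ st.2 then st
        else if value ∉ S then st
        else (st.1 ++ [value], PySem.Set.add st.2 value))
      (acc, acc)).1
    = ((ts.map f).filter (fun v => v ≠ "" ∧ v ∈ S)).foldl PySem.Set.add acc := by
  induction ts generalizing acc with
  | nil => simp
  | cons t ts ih =>
    simp only [List.foldl_cons, List.map_cons, List.filter_cons]
    by_cases hE : f t = ""
    · simpa [hE] using ih acc hnd
    · by_cases hS : f t ∈ S
      · by_cases hM : f t ∈ acc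
        · have hadd : PySem.Set.add acc (f t) = acc := by
            simp [PySem.Set.add, PySem.Set.contains, hM]
          simpa [hadd, hE, hS, hM] using ih acc hnd
        · have hadd : PySem.Set.add acc (f t) = acc ++ [f t] := by
            simp [PySem.Set.add, PySem.Set.contains, hM]
          have hnd' : (acc ++ [f t]).Nodup := by
            exact hnd.append (List.nodup_singleton _) (by simpa [List.disjoint_singleton] using hM)
          simpa [hadd, hE, hS, hM] using ih (acc ++ [f t]) hnd'
      · simpa [hE, hS] using ih acc hnd

-- Folding Set.add may drop elements already absorbed by a smaller seen list without change.
theorem pv_fold_filter_sub (t : List String) :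
    ∀ (s s' : List String), s ⊆ s' →
    t.foldl PySem.Set.add s' = (t.filter (fun x => x ∉ s)).foldl PySem.Set.add s' := by
  induction t with
  | nil => intro s s' _; simp
  | cons x t ih =>
    intro s s' hsub
    by_cases hx : x ∈ s
    · have hx' : x ∈ s' := hsub hx
      have : PySem.Set.add s' x = s' := by simp [PySem.Set.add, PySem.Set.contains, hx']
      simpa [List.filter_cons, hx, this] using ih s s' hsub
    · have hsub' : s ⊆ PySem.Set.add s' x := by
        intro y hy
        by_cases h : y ∈ s'
        · simp [PySem.Set.add, PySem.Set.contains]; split <;> simp [h]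
        · exact absurd (hsub hy) h
      simpa [List.filter_cons, hx] using ih s (PySem.Set.add s' x) hsub'

-- A head already in front of the accumulator and absent from the tail commutes out of the fold.
theorem pv_fold_cons (u : List String) :
    ∀ (s : List String) (x : String), x ∉ u →
    u.foldl PySem.Set.add (x :: s) = x :: u.foldl PySem.Set.add s := by
  induction u with
  | nil => intro s x _; simp
  | cons y u ih =>
    intro s x hx
    have hyx : y ≠ x := by intro h; exact hx (by simp [h])
    have hstep : PySem.Set.add (x :: s) y = x :: PySem.Set.add s y := by
      simp [PySem.Set.add, PySem.Set.contains, hyx]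
      split <;> simp
    have hx' : x ∉ u := fun h => hx (List.mem_cons_of_mem _ h)
    simp [List.foldl_cons, hstep, ih (PySem.Set.add s y) x hx']

-- Set.ofList satisfies B's recursive dedup equation.
theorem pv_ofList_cons (h : String) (t : List String) :
    PySem.Set.ofList (h :: t) = h :: PySem.Set.ofList (t.filter (fun x => x ≠ h)) := by
  have h1 : PySem.Set.ofList (h :: t) = t.foldl PySem.Set.add [h] := by
    simp [PySem.Set.ofList_eq_foldl, PySem.Set.add, PySem.Set.contains]
  have h2 : t.foldl PySem.Set.add [h]
      = (t.filter (fun x => x ∉ ([h] : List String))).foldl PySem.Set.add [h] :=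
    pv_fold_filter_sub t [h] [h] (List.Subset.refl _)
  have h3 : t.filter (fun x => x ∉ ([h] : List String)) = t.filter (fun x => x ≠ h) := by
    apply List.filter_congr; intro x _; simp
  have h4 : (t.filter (fun x => x ≠ h)).foldl PySem.Set.add [h]
      = h :: (t.filter (fun x => x ≠ h)).foldl PySem.Set.add [] := by
    exact pv_fold_cons _ _ _ (by simp)
  rw [h1, h2, h3, h4, ← PySem.Set.ofList_eq_foldl]

-- B's recursive dedup equals dict.fromkeys-style first-occurrence dedup.
theorem pv_dedupFirst_len (n : Nat) : ∀ (xs : List String), xs.length ≤ n →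
    pvDedupFirst xs = PySem.List.dedup xs := by
  induction n with
  | zero =>
    intro xs hx
    have : xs = [] := List.eq_nil_of_length_eq_zero (Nat.le_zero.mp hx)
    subst this; simp [pvDedupFirst]
  | succ n ih =>
    intro xs hx
    match xs with
    | [] => simp [pvDedupFirst]
    | h :: t =>
      have hlen : (t.filter (fun x => x ≠ h)).length ≤ n :=
        le_trans (List.length_filter_le _ _) (Nat.lt_succ_iff.mp hx)
      rw [pvDedupFirst, ih _ hlen, PySem.List.dedup_eq_ofList, PySem.List.dedup_eq_ofList,
        pv_ofList_cons]

theorem pv_dedupFirst_eq (xs : List String) : pvDedupFirst xs = PySem.List.dedup xs :=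
  pv_dedupFirst_len xs.length xs (le_refl _)

-- A's loop from the empty initial state computes the dedup of the filtered tokens.
theorem pv_loop0 (ts : List String) :
    (ts.foldl
      (fun (st : List String × PySem.Set String) item =>
        let value := PySem.Str.lower (PySem.Str.strip item)
        if value = "" ∨ value ∈ st.2 then st
        else if value ∉ pvSupported then st
        else (st.1 ++ [value], PySem.Set.add st.2 value))
      ([], PySem.Set.empty)).1
    = PySem.List.dedup ((ts.map (fun item => PySem.Str.lower (PySem.Str.strip item))).filter
        (fun v => v ≠ "" ∧ v ∈ pvSupported)) := by
  rw [PySem.List.dedup_eq_ofList, PySem.Set.ofList_eq_foldl]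
  exact pv_loop (fun item => PySem.Str.lower (PySem.Str.strip item)) pvSupported ts [] List.nodup_nil

-- A's emptiness test is subsumed by support membership: "" is not a supported permission.
theorem pv_filter_eq (ts : List String) :
    ts.filter (fun v => v ≠ "" ∧ v ∈ pvSupported) = ts.filter (fun v => v ∈ pvSupported) := by
  apply List.filter_congr
  intro v _
  by_cases hv : v = ""
  · subst hv; decide
  · simp [hv]

-- ===== VERDICT (by name: the statement is the Claim_ definition above) =====
theorem normalize_permission_list_py_spec : Claim_equal_normalize_permission_list_py := by
  intro raw _
  show normalize_permission_list_py raw = normalize_permission_list_py_alt raw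
  simp only [normalize_permission_list_py, normalize_permission_list_py_alt,
    pv_loop0, pv_filter_eq, pv_dedupFirst_eq]
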